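-- pv_equiv track=rewrite | github.com/spwilson27/vibekek | workflow_lib/context.py | fit_lines_to_budget
-- ===== SOURCE A (Python) =====
-- from typing import Any, Callable, List, Dict, Optional, Union
--
-- def fit_lines_to_budget(entries_lines: List[List[str]], word_budget: int) -> int:
--     """Return the maximum lines-per-entry such that total word count ≤ *word_budget*.
--
--     Uses a binary search over the uniform line limit applied to all entries,
--     matching each entry's lines from the start.  All entries are truncated to
--     the same limit so no single entry dominates the budget.
--
--     :param entries_lines: Each element is the list of lines for one document or
--         file.  Empty entries are allowed and contribute zero words.
--     :type entries_lines: list[list[str]]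
--     :param word_budget: Maximum total words across all entries.
--     :type word_budget: int
--     :returns: The largest per-entry line limit that keeps the total within
--         *word_budget*, or ``0`` when *entries_lines* is empty.
--     :rtype: int
--     """
--     if not entries_lines:
--         return 0
--     max_lines = max((len(e) for e in entries_lines), default=0)
--     if max_lines == 0:
--         return 0
--
--     def _count(limit: int) -> int:
--         return sum(len(line.split()) for e in entries_lines for line in e[:limit])
--
--     if _count(max_lines) <= word_budget:
--         return max_lines
--
--     lo, hi = 1, max_lines
--     while lo < hi:
--         mid = (lo + hi + 1) // 2
--         if _count(mid) <= word_budget: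
--             lo = mid
--         else:
--             hi = mid - 1
--     return lo
-- ===== SOURCE B (Python) =====
-- from typing import List
--
-- def fit_lines_to_budget(entries_lines: List[List[str]], word_budget: int) -> int:
--     """Single-pass version: bucket word counts per line index, then extend the
--     uniform limit greedily while the running total stays within the budget."""
--     if not entries_lines:
--         return 0
--     max_lines = max(len(e) for e in entries_lines)
--     if max_lines == 0:
--         return 0
--     level = [0] * max_lines
--     for e in entries_lines:
--         for i, line in enumerate(e):
--             level[i] += len(line.split())
--     total = level[0]
--     best = 1
--     for count in level[1:]:
--         if total + count <= word_budget:
--             total += count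
--             best += 1
--         else:
--             break
--     return best
-- ===== Notes on version B (the rewrite author's own statement) =====
-- stated objective: faster
-- what changed: Replaces the binary search (which re-counts words over all entries at every probe) by a single pass that buckets word counts per line index and then greedily extends the uniform limit over the running prefix total.
import Mathlib
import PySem

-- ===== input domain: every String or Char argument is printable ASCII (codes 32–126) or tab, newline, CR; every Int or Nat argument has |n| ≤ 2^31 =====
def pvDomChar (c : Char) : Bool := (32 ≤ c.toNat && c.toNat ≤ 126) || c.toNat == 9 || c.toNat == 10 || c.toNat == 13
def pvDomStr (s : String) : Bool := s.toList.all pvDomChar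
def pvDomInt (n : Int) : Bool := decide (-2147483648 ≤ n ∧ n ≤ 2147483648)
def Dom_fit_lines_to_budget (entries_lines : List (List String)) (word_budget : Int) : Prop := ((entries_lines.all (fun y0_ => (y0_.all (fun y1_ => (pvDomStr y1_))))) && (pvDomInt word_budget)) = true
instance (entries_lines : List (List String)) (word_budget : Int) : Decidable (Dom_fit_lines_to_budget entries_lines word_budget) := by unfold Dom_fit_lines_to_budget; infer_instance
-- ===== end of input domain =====

-- B replaces A's binary search over the line limit by one pass that buckets word
-- counts per line index and extends the limit greedily (objective: faster).


-- ===== PORT A =====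
-- sum(len(line.split()) for e in entries_lines for line in e[:limit])
def countA (entries_lines : List (List String)) (limit : Int) : Int :=
  ((entries_lines.flatMap (fun e => PySem.List.slice e none (some limit))).map
    (fun line => ((PySem.Str.split₀ line).length : Int))).sum

-- while lo < hi: mid = (lo + hi + 1) // 2; …
-- (fuel only makes the loop total; it is always called with fuel > hi - lo, so the
-- zero-fuel branch is never reached)
def loopA (entries_lines : List (List String)) (word_budget : Int) : Nat → Int → Int → Int
  | 0, lo, _ => lo
  | fuel + 1, lo, hi =>
    if lo < hi then
      let mid := PySem.Int.floordiv (lo + hi + 1) 2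
      if countA entries_lines mid ≤ word_budget then
        loopA entries_lines word_budget fuel mid hi
      else
        loopA entries_lines word_budget fuel lo (mid - 1)
    else lo

def fit_lines_to_budget (entries_lines : List (List String)) (word_budget : Int) : Int :=
  if entries_lines = [] then 0
  else
    let max_lines : Int :=
      (PySem.List.max? (entries_lines.map (fun e => (e.length : Int))) (fun x => x)).getD 0
    if max_lines = 0 then 0
    else if countA entries_lines max_lines ≤ word_budget then max_lines
    else loopA entries_lines word_budget ((max_lines - 1).toNat + 1) 1 max_lines

-- ===== PORT B =====
def wcB (line : String) : Int := ((PySem.Str.split₀ line).length : Int)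

-- for i, line in enumerate(e): level[i] += len(line.split())
def addEntry : List Int → List String → List Int
  | acc, [] => acc
  | [], _ :: _ => []
  | a :: as, l :: ls => (a + wcB l) :: addEntry as ls

-- for count in level[1:]: if total + count <= word_budget: …: else: break
def scanLevels (word_budget : Int) : Int → Int → List Int → Int
  | _, best, [] => best
  | total, best, c :: rest =>
    if total + c ≤ word_budget then scanLevels word_budget (total + c) (best + 1) rest
    else best

def fit_lines_to_budget_alt (entries_lines : List (List String)) (word_budget : Int) : Int :=
  if entries_lines = [] then 0
  else
    let max_lines : Int :=
      (PySem.List.max? (entries_lines.map (fun e => (e.length : Int))) (fun x => x)).getD 0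
    if max_lines = 0 then 0
    else
      let levels := entries_lines.foldl addEntry (List.replicate max_lines.toNat 0)
      match levels with
      | [] => 0
      | c0 :: rest => scanLevels word_budget c0 1 rest

-- ===== PRECONDITION & SPEC =====
def Spec_fit_lines_to_budget (entries_lines : List (List String)) (word_budget : Int) (out : Int) : Prop := out = fit_lines_to_budget_alt entries_lines word_budget
instance (entries_lines : List (List String)) (word_budget : Int) (out : Int) : Decidable (Spec_fit_lines_to_budget entries_lines word_budget out) := by unfold Spec_fit_lines_to_budget; infer_instance

-- ===== CLAIM (what is proved, stated in full; the proofs are below) =====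
def Claim_equal_fit_lines_to_budget : Prop := ∀ (entries_lines : List (List String)) (word_budget : Int), Dom_fit_lines_to_budget entries_lines word_budget → Spec_fit_lines_to_budget entries_lines word_budget (fit_lines_to_budget entries_lines word_budget)

-- ===== LEMMAS AND PROOFS =====

-- total word count of the first k lines of every entry
def cnt (entries_lines : List (List String)) (k : Nat) : Int :=
  (entries_lines.map (fun e => ((e.take k).map wcB).sum)).sum

theorem wcB_nonneg (l : String) : 0 ≤ wcB l := Int.natCast_nonneg _

theorem sum_wc_nonneg (ls : List String) : 0 ≤ (ls.map wcB).sum :=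
  List.sum_nonneg (by intro x hx; simp only [List.mem_map] at hx; obtain ⟨l, _, rfl⟩ := hx; exact wcB_nonneg l)

theorem countA_eq_cnt (entries_lines : List (List String)) (limit : Int) (h : 0 ≤ limit) :
    countA entries_lines limit = cnt entries_lines limit.toNat := by
  simp only [countA, cnt, PySem.List.slice_to _ h]
  induction entries_lines with
  | nil => simp
  | cons e es ih => simp only [List.flatMap_cons, List.map_append, List.sum_append, ih, List.map_cons,
      List.sum_cons]; rfl

theorem cnt_mono (entries_lines : List (List String)) {k k' : Nat} (h : k ≤ k') :
    cnt entries_lines k ≤ cnt entries_lines k' := by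
  unfold cnt
  apply List.sum_le_sum
  intro e he
  have htk : e.take k = (e.take k').take k := by
    rw [List.take_take, Nat.min_eq_left h]
  calc ((e.take k).map wcB).sum
      ≤ ((e.take k).map wcB).sum + (((e.take k').drop k).map wcB).sum := by
        have := sum_wc_nonneg ((e.take k').drop k); omega
    _ = ((e.take k').map wcB).sum := by
        conv_rhs => rw [← List.take_append_drop k (e.take k')]
        rw [List.map_append, List.sum_append, ← htk]

theorem cnt_sat (entries_lines : List (List String)) {K k : Nat}
    (hK : ∀ e ∈ entries_lines, e.length ≤ K) (h : K ≤ k) :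
    cnt entries_lines k = cnt entries_lines K := by
  unfold cnt
  congr 1
  apply List.map_congr_left
  intro e he
  rw [List.take_of_length_le (le_trans (hK e he) h), List.take_of_length_le (hK e he)]

theorem addEntry_length (acc : List Int) (e : List String) : (addEntry acc e).length = acc.length := by
  induction e generalizing acc with
  | nil => cases acc <;> simp [addEntry]
  | cons l ls ih =>
    cases acc with
    | nil => simp [addEntry]
    | cons a as => simp [addEntry, ih]

theorem addEntry_nonneg (acc : List Int) (e : List String) (h : ∀ c ∈ acc, 0 ≤ c) :
    ∀ c ∈ addEntry acc e, 0 ≤ c := by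
  induction e generalizing acc with
  | nil => cases acc <;> exact fun c hc => h c hc
  | cons l ls ih =>
    cases acc with
    | nil => simp [addEntry]
    | cons a as =>
      intro c hc
      simp only [addEntry, List.mem_cons] at hc
      rcases hc with rfl | hc
      · have := h a (by simp); have := wcB_nonneg l; omega
      · exact ih as (fun c hc => h c (by simp [hc])) c hc

theorem foldl_length (entries : List (List String)) (acc : List Int) :
    (entries.foldl addEntry acc).length = acc.length := by
  induction entries generalizing acc with
  | nil => rfl
  | cons e es ih => simp [List.foldl_cons, ih, addEntry_length]

theorem foldl_nonneg (entries : List (List String)) (acc : List Int) (h : ∀ c ∈ acc, 0 ≤ c) :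
    ∀ c ∈ entries.foldl addEntry acc, 0 ≤ c := by
  induction entries generalizing acc with
  | nil => exact h
  | cons e es ih => exact ih (addEntry acc e) (addEntry_nonneg acc e h)

theorem addEntry_sum_take (e : List String) : ∀ (acc : List Int) (k : Nat), e.length ≤ acc.length →
    ((addEntry acc e).take k).sum = (acc.take k).sum + ((e.take k).map wcB).sum := by
  induction e with
  | nil => intro acc k _; cases acc <;> simp [addEntry]
  | cons l ls ih =>
    intro acc k h
    cases acc with
    | nil => simp at h
    | cons a as =>
      cases k with
      | zero => simp
      | succ k =>
        simp only [addEntry, List.take_succ_cons, List.map_cons, List.sum_cons]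
        rw [ih as k (by simpa using h)]
        ring

theorem foldl_sum_take (entries : List (List String)) : ∀ (acc : List Int) (k : Nat),
    (∀ e ∈ entries, e.length ≤ acc.length) →
    ((entries.foldl addEntry acc).take k).sum = (acc.take k).sum + cnt entries k := by
  induction entries with
  | nil => intro acc k _; simp [cnt]
  | cons e es ih =>
    intro acc k h
    simp only [List.foldl_cons]
    rw [ih (addEntry acc e) k
        (fun e' he' => by rw [addEntry_length]; exact h e' (by simp [he'])),
      addEntry_sum_take e acc k (h e (by simp))]
    simp only [cnt, List.map_cons, List.sum_cons]
    ring

theorem scan_spec (budget : Int) : ∀ (rest : List Int) (total best : Int),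
    (∀ c ∈ rest, 0 ≤ c) →
    best ≤ scanLevels budget total best rest ∧
    scanLevels budget total best rest ≤ best + rest.length ∧
    (scanLevels budget total best rest = best ∨
      total + (rest.take (scanLevels budget total best rest - best).toNat).sum ≤ budget) ∧
    (∀ j : Nat, (scanLevels budget total best rest - best).toNat < j → j ≤ rest.length →
      budget < total + (rest.take j).sum) := by
  intro rest
  induction rest with
  | nil =>
    intro total best _
    refine ⟨le_refl _, by simp [scanLevels], Or.inl rfl, fun j hj hj' => by simp at hj'; omega⟩
  | cons c cs ih =>
    intro total best hnn
    by_cases hfit : total + c ≤ budget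
    · simp only [scanLevels, if_pos hfit]
      obtain ⟨h1, h2, h3, h4⟩ := ih (total + c) (best + 1) (fun x hx => hnn x (by simp [hx]))
      set r := scanLevels budget (total + c) (best + 1) cs with hr
      refine ⟨by omega, by simp only [List.length_cons]; omega, ?_, ?_⟩
      · right
        have hrb : (r - best).toNat = (r - (best + 1)).toNat + 1 := by omega
        rw [hrb, List.take_succ_cons, List.sum_cons]
        rcases h3 with h3 | h3
        · rw [h3]; simpa using hfit
        · omega
      · intro j hj hj'
        have hj1 : 1 ≤ j := by omega
        obtain ⟨j', rfl⟩ : ∃ j', j = j' + 1 := ⟨j - 1, by omega⟩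
        rw [List.take_succ_cons, List.sum_cons]
        have := h4 j' (by omega) (by simpa using hj')
        omega
    · simp only [scanLevels, if_neg hfit]
      refine ⟨le_refl _, by simp only [List.length_cons]; push_cast; omega, Or.inl trivial, ?_⟩
      intro j hj hj'
      obtain ⟨j', rfl⟩ : ∃ j', j = j' + 1 := ⟨j - 1, by omega⟩
      rw [List.take_succ_cons, List.sum_cons]
      have hs : 0 ≤ (cs.take j').sum :=
        List.sum_nonneg (fun x hx => hnn x (by simp [List.mem_of_mem_take hx]))
      omega

theorem loopA_spec (entries : List (List String)) (budget : Int)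
    (mono : ∀ a b : Int, 1 ≤ a → a ≤ b → countA entries a ≤ countA entries b) :
    ∀ (fuel : Nat) (lo hi : Int), (hi - lo).toNat < fuel → 1 ≤ lo → lo ≤ hi →
    (lo = 1 ∨ countA entries lo ≤ budget) →
    (∀ k : Int, hi < k → budget < countA entries k) →
    (1 ≤ loopA entries budget fuel lo hi ∧
     (loopA entries budget fuel lo hi = 1 ∨ countA entries (loopA entries budget fuel lo hi) ≤ budget) ∧
     (∀ k : Int, loopA entries budget fuel lo hi < k → budget < countA entries k)) := by
  intro fuel
  induction fuel with
  | zero => intro lo hi hf; omega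
  | succ fuel ih =>
    intro lo hi hf h1 h2 h3 h4
    by_cases hlt : lo < hi
    · simp only [loopA, if_pos hlt]
      have hmid : PySem.Int.floordiv (lo + hi + 1) 2 = (lo + hi + 1) / 2 :=
        PySem.Int.floordiv_eq_ediv_of_pos (by omega)
      by_cases hle : countA entries (PySem.Int.floordiv (lo + hi + 1) 2) ≤ budget
      · simp only [if_pos hle]
        exact ih _ hi (by omega) (by omega) (by omega) (Or.inr hle) h4
      · simp only [if_neg hle]
        refine ih lo _ (by omega) h1 (by omega) h3 ?_
        intro k hk
        by_cases hkhi : hi < k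
        · exact h4 k hkhi
        · have := mono (PySem.Int.floordiv (lo + hi + 1) 2) k (by omega) (by omega)
          omega
    · simp only [loopA, if_neg hlt]
      exact ⟨h1, h3, fun k hk => h4 k (by omega)⟩

-- ===== VERDICT (by name: the statement is the Claim_ definition above) =====
theorem fit_lines_to_budget_spec : Claim_equal_fit_lines_to_budget := by
  unfold Claim_equal_fit_lines_to_budget
  intro entries budget _dom
  unfold Spec_fit_lines_to_budget
  by_cases he : entries = []
  · simp [fit_lines_to_budget, fit_lines_to_budget_alt, he]
  · obtain ⟨mv, hmv⟩ : ∃ mv, PySem.List.max? (entries.map (fun e => (e.length : Int))) (fun x => x) = some mv := by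
      rcases h : PySem.List.max? (entries.map (fun e => (e.length : Int))) (fun x => x) with _ | mv
      · rw [PySem.List.max?_eq_none_iff] at h
        simp only [List.map_eq_nil_iff] at h
        exact absurd h he
      · exact ⟨mv, h⟩
    have hmax : ∀ e ∈ entries, (e.length : Int) ≤ mv := fun e heq =>
      PySem.List.max?_isMax hmv _ (List.mem_map_of_mem heq)
    have hmem : mv ∈ entries.map (fun e => (e.length : Int)) := PySem.List.max?_mem hmv
    have hmv0 : 0 ≤ mv := by
      obtain ⟨e0, _, rfl⟩ := List.mem_map.mp hmem
      exact Int.natCast_nonneg _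
    simp only [fit_lines_to_budget, fit_lines_to_budget_alt, if_neg he, hmv, Option.getD_some]
    by_cases hz : mv = 0
    · simp [hz]
    · simp only [if_neg hz]
      have hM1 : 1 ≤ mv.toNat := by omega
      have hMcast : ((mv.toNat : Int)) = mv := Int.toNat_of_nonneg hmv0
      have hlen : ∀ e ∈ entries, e.length ≤ mv.toNat := fun e heq => by
        have := hmax e heq; omega
      have hLlen : (entries.foldl addEntry (List.replicate mv.toNat (0 : Int))).length = mv.toNat := by
        rw [foldl_length]; simp
      have hnonneg : ∀ c ∈ entries.foldl addEntry (List.replicate mv.toNat (0 : Int)), 0 ≤ c :=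
        foldl_nonneg _ _ (by intro c hc; rw [List.eq_of_mem_replicate hc])
      have hS : ∀ k : Nat, ((entries.foldl addEntry (List.replicate mv.toNat (0 : Int))).take k).sum = cnt entries k := by
        intro k
        rw [foldl_sum_take entries _ k (by intro e heq; simpa using hlen e heq)]
        simp [List.take_replicate]
      obtain ⟨c0, rest, hcr⟩ : ∃ c0 rest, entries.foldl addEntry (List.replicate mv.toNat (0 : Int)) = c0 :: rest := by
        rcases hl : entries.foldl addEntry (List.replicate mv.toNat (0 : Int)) with _ | ⟨c0, rest⟩
        · rw [hl] at hLlen; simp at hLlen; omega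
        · exact ⟨c0, rest, rfl⟩
      have hrlen : rest.length = mv.toNat - 1 := by
        rw [hcr] at hLlen; simp at hLlen; omega
      obtain ⟨s1, s2, s3, s4⟩ := scan_spec budget rest c0 1
        (fun c hc => hnonneg c (by rw [hcr]; exact List.mem_cons_of_mem _ hc))
      have hS' : ∀ k : Nat, 1 ≤ k → c0 + (rest.take (k - 1)).sum = cnt entries k := by
        intro k hk
        have h0 := hS k
        rw [hcr] at h0
        obtain ⟨k', rfl⟩ : ∃ k', k = k' + 1 := ⟨k - 1, by omega⟩
        simpa [List.take_succ_cons] using h0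
      have hcA : countA entries mv = cnt entries mv.toNat := countA_eq_cnt entries mv hmv0
      rw [hcr]
      by_cases hfit : countA entries mv ≤ budget
      · simp only [if_pos hfit]
        have hr : scanLevels budget c0 1 rest = 1 + (rest.length : Int) := by
          by_contra hne
          have h4 := s4 rest.length (by omega) (le_refl _)
          have h5 := hS' mv.toNat hM1
          rw [← hrlen] at h5
          omega
        rw [hr]
        omega
      · simp only [if_neg hfit]
        have mono : ∀ a b : Int, 1 ≤ a → a ≤ b → countA entries a ≤ countA entries b := by
          intro a b ha hab
          rw [countA_eq_cnt entries a (by omega), countA_eq_cnt entries b (by omega)]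
          exact cnt_mono entries (Int.toNat_le_toNat hab)
        have hbig : budget < cnt entries mv.toNat := by omega
        obtain ⟨a1, a2, a3⟩ := loopA_spec entries budget mono ((mv - 1).toNat + 1) 1 mv
          (by omega) le_rfl (by omega) (Or.inl rfl)
          (by
            intro k hk
            rw [countA_eq_cnt entries k (by omega), cnt_sat entries hlen (by omega)]
            exact hbig)
        have b1 : 1 ≤ scanLevels budget c0 1 rest := s1
        have b2 : scanLevels budget c0 1 rest = 1 ∨ countA entries (scanLevels budget c0 1 rest) ≤ budget := by
          rcases s3 with h | h
          · exact Or.inl h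
          · right
            rw [countA_eq_cnt entries _ (by omega)]
            have h6 := hS' (scanLevels budget c0 1 rest).toNat (by omega)
            have htn : (scanLevels budget c0 1 rest - 1).toNat = (scanLevels budget c0 1 rest).toNat - 1 := by omega
            rw [htn] at h
            omega
        have b3 : ∀ k : Int, scanLevels budget c0 1 rest < k → budget < countA entries k := by
          intro k hk
          rw [countA_eq_cnt entries k (by omega)]
          by_cases hkM : k.toNat ≤ mv.toNat
          · have h7 := s4 (k.toNat - 1) (by omega) (by omega)
            have h8 := hS' k.toNat (by omega)
            omega
          · rw [cnt_sat entries hlen (by omega)]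
            exact hbig
        by_contra hne
        rcases lt_or_gt_of_ne hne with hlt | hgt
        · have h9 := a3 _ hlt
          rcases b2 with h | h <;> omega
        · have h9 := b3 _ hgt
          rcases a2 with h | h <;> omega
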